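-- pv_equiv track=rewrite | github.com/mikehankey/cvinfo.org | python/create_main_gbu_page.py | sort_width_dc
-- ===== SOURCE A (Python) =====
-- def sort_width_dc(all_groups):
--
--    # Warning: we need to move DC
--    if('DC' in all_groups):
--       tmp_group = all_groups
--       tmp_group = [g.replace('DC', 'WAS') for g in tmp_group]
--       tmp_group = sorted(tmp_group)
--       index_of_dc = tmp_group.index("WAS")
--       all_groups.remove('DC')
--       all_groups.insert(index_of_dc, 'DC')
--    return all_groups
-- ===== SOURCE B (Python) =====
-- def _without_first_dc(xs):
--    # rebuild the list with the first 'DC' removed: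
--    # copy elements until the first 'DC', then append the rest unchanged
--    out = []
--    i = 0
--    while i < len(xs) and xs[i] != 'DC':
--       out.append(xs[i])
--       i += 1
--    return out + xs[i+1:]
--
-- def sort_width_dc(all_groups):
--    # Same in-place mutation as A: move the first 'DC' to its sorted position
--    # (sorting as 'WAS'), computed by a counting pass and slice rebuild
--    # instead of sorting a replaced copy and calling .index/.remove/.insert.
--    if 'DC' in all_groups:
--       k = sum(1 for g in all_groups if g.replace('DC', 'WAS') < 'WAS')
--       rest = _without_first_dc(all_groups)
--       all_groups[:] = rest[:k] + ['DC'] + rest[k:]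
--    return all_groups
-- ===== Notes on version B (the rewrite author's own statement) =====
-- stated objective: alternative
-- what changed: Instead of sorting a DC->WAS-replaced copy and using .index('WAS')/.remove/.insert, B counts in one pass the elements whose DC->WAS form is below 'WAS' to get the insert position, removes the first 'DC' with a recursive rebuild, and splices the result with slices.
import Mathlib
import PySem

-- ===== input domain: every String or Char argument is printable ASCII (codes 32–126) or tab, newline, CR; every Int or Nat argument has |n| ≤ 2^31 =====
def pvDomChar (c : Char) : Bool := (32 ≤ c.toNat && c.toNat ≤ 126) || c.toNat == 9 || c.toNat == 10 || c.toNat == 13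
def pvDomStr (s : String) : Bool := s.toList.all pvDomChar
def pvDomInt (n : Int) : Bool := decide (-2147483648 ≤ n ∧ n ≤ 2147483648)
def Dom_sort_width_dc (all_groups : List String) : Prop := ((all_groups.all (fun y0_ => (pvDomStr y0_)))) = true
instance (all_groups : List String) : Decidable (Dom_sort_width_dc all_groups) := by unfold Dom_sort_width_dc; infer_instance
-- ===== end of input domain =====

-- B replaces A's copy+sort+.index('WAS')/.remove/.insert by a counting pass
-- (count of elements whose DC->WAS form is < 'WAS' = the sorted position), a
-- recursive removal of the first 'DC' and a slice splice; both A and B mutate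
-- all_groups in place in Python identically; the equivalence proved here is
-- about the returned list.

-- ===== PORT A =====
def sort_width_dc (all_groups : List String) : List String :=
  if all_groups.contains "DC" then
    -- tmp_group = [g.replace('DC','WAS') for g in tmp_group]; tmp_group = sorted(tmp_group)
    let tmp_group := all_groups.map (fun g => PySem.Str.replace g "DC" "WAS")
    let tmp_group := PySem.List.sorted tmp_group (fun x => x) false
    match PySem.List.index? tmp_group "WAS" with
    | none => all_groups      -- unreachable: 'DC' ∈ all_groups puts 'WAS' in tmp_group (Python would raise ValueError)
    | some index_of_dc =>
      match PySem.List.remove? all_groups "DC" with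
      | none => all_groups    -- unreachable: 'DC' ∈ all_groups
      | some rest => PySem.List.insert rest (index_of_dc : Int) "DC"
  else all_groups

-- ===== PORT B =====
-- _without_first_dc: rebuild the list with the first 'DC' removed
def withoutFirstDC : List String → List String
  | [] => []
  | g :: t => if g = "DC" then t else g :: withoutFirstDC t

def sort_width_dc_alt (all_groups : List String) : List String :=
  if all_groups.contains "DC" then
    -- k = sum(1 for g in all_groups if g.replace('DC','WAS') < 'WAS')
    let k := all_groups.countP (fun g => decide (PySem.Str.replace g "DC" "WAS" < "WAS"))
    let rest := withoutFirstDC all_groups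
    -- all_groups[:] = rest[:k] + ['DC'] + rest[k:]  (k is a nonnegative in-range slice bound)
    rest.take k ++ "DC" :: rest.drop k
  else all_groups

-- ===== PRECONDITION & SPEC =====
def Spec_sort_width_dc (all_groups : List String) (out : List String) : Prop := out = sort_width_dc_alt all_groups
instance (all_groups : List String) (out : List String) : Decidable (Spec_sort_width_dc all_groups out) := by unfold Spec_sort_width_dc; infer_instance

-- ===== CLAIM =====
def Claim_equal_sort_width_dc : Prop := ∀ (all_groups : List String), Dom_sort_width_dc all_groups → Spec_sort_width_dc all_groups (sort_width_dc all_groups)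

-- ===== LEMMAS AND PROOFS =====

-- in a ≤-sorted list containing v, the first index of v is the number of elements < v
theorem index?_sorted_eq_countP_lt {α : Type} [LinearOrder α] [BEq α] [LawfulBEq α]
    (v : α) : ∀ (s : List α), s.Pairwise (· ≤ ·) → v ∈ s →
    PySem.List.index? s v = some (s.countP (fun x => decide (x < v))) := by
  intro s
  induction s with
  | nil => intro _ hv; cases hv
  | cons a t ih =>
    intro hp hv
    have h1 : ∀ x ∈ t, a ≤ x := (List.pairwise_cons.mp hp).1
    have h2 : t.Pairwise (· ≤ ·) := (List.pairwise_cons.mp hp).2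
    by_cases hav : a = v
    · subst hav
      have hz : t.countP (fun x => decide (x < a)) = 0 := by
        refine List.countP_eq_zero.mpr ?_
        intro x hx
        simpa using not_lt_of_ge (h1 x hx)
      rw [PySem.List.index?_cons_self]
      simp [hz]
    · have hvt : v ∈ t := by
        rcases List.mem_cons.mp hv with h | h
        · exact absurd h.symm hav
        · exact h
      have halt : a < v := lt_of_le_of_ne (h1 v hvt) hav
      rw [PySem.List.index?_cons_of_ne t hav, ih h2 hvt]
      simp [halt]

theorem withoutFirstDC_eq_erase : ∀ (l : List String), withoutFirstDC l = l.erase "DC" := by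
  intro l
  induction l with
  | nil => rfl
  | cons a t ih =>
    by_cases h : a = "DC"
    · subst h; simp [withoutFirstDC]
    · simp [withoutFirstDC, h, ih, List.erase_cons_tail]

-- the count of elements below 'WAS' fits in the list with 'DC' removed
theorem count_le_erase_len (l : List String) (h : ("DC" : String) ∈ l) :
    l.countP (fun g => decide (PySem.Str.replace g "DC" "WAS" < "WAS")) ≤ (l.erase "DC").length := by
  have hperm := List.perm_cons_erase h
  rw [hperm.countP_eq]
  have hrep : PySem.Str.replace "DC" "DC" "WAS" = "WAS" := by decide
  have hdc : (fun g => decide (PySem.Str.replace g "DC" "WAS" < ("WAS" : String))) "DC" = false := by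
    simp only [hrep]; simp
  simp only [List.countP_cons, hdc]
  simpa using List.countP_le_length (l := l.erase "DC")

-- ===== VERDICT =====
theorem sort_width_dc_spec : Claim_equal_sort_width_dc := by
  intro all_groups _
  unfold Spec_sort_width_dc sort_width_dc sort_width_dc_alt
  by_cases hdc : all_groups.contains "DC"
  · simp only [hdc, if_true]
    have hmem : "DC" ∈ all_groups := by simpa using hdc
    set f : String → String := fun g => PySem.Str.replace g "DC" "WAS" with hf
    have hwas : ("WAS" : String) ∈ all_groups.map f := by
      refine List.mem_map.mpr ⟨"DC", hmem, ?_⟩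
      simp [hf]
      decide
    set s := PySem.List.sorted (all_groups.map f) (fun x => x) false with hs
    have hpair : s.Pairwise (· ≤ ·) := by
      simpa using PySem.List.sorted_pairwise (all_groups.map f) (fun x => x)
    have hmemS : ("WAS" : String) ∈ s := by
      rw [hs]; exact (PySem.List.sorted_perm (all_groups.map f) (fun x => x) false).mem_iff.mpr hwas
    have hidx := index?_sorted_eq_countP_lt ("WAS" : String) s hpair hmemS
    have hcnt : s.countP (fun x => decide (x < "WAS")) =
        all_groups.countP (fun g => decide (PySem.Str.replace g "DC" "WAS" < "WAS")) := by
      rw [(PySem.List.sorted_perm (all_groups.map f) (fun x => x) false).countP_eq]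
      rw [List.countP_map]
      rfl
    rw [hidx, hcnt]
    rw [PySem.List.remove?_eq_some_erase all_groups "DC" hmem]
    rw [withoutFirstDC_eq_erase]
    exact PySem.List.insert_natCast _ _ _ (count_le_erase_len all_groups hmem)
  · have h : ("DC" : String) ∉ all_groups := by simpa using hdc
    simp [h]
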